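-- pv_equiv track=rewrite | github.com/chulbioinfo/ReAlignPro | src/realignpro/tsv2fig.py | _homopolymer_indices
-- ===== SOURCE A (Python) =====
-- from typing import Dict, List, Optional, Set, Tuple
--
-- def _homopolymer_indices(seq: str, threshold: int) -> Set[int]:
--     idxs: Set[int] = set()
--     i = 0
--     n = len(seq)
--     while i < n:
--         b = seq[i]
--         if b not in "ATCG":
--             i += 1
--             continue
--         j = i + 1
--         while j < n and seq[j] == b:
--             j += 1
--         if (j - i) >= threshold:
--             idxs.update(range(i, j))
--         i = j
--     return idxs
-- ===== SOURCE B (Python) =====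
-- from typing import Set
--
-- def _homopolymer_indices(seq: str, threshold: int) -> Set[int]:
--     # Per-index run-length DP: right[i] = length of the equal run starting at i
--     # (going right), left[i] = length ending at i (going left); index i belongs
--     # to a run of total length left[i] + right[i] - 1, so membership is a
--     # per-index test -- no run enumeration, no range insertion.
--     n = len(seq)
--     right = [1] * n
--     for i in range(n - 2, -1, -1):
--         if seq[i] == seq[i + 1]:
--             right[i] = right[i + 1] + 1
--     left = [1] * n
--     for i in range(1, n):
--         if seq[i] == seq[i - 1]:
--             left[i] = left[i - 1] + 1
--     return {i for i, (c, l, r) in enumerate(zip(seq, left, right))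
--             if c in "ATCG" and l + r - 1 >= threshold}
-- ===== Notes on version B (the rewrite author's own statement) =====
-- stated objective: alternative
-- what changed: Replaces A's run-enumerating two-pointer scan (find each run, add a whole index range) with two run-length DP arrays (run length to the left / to the right of each index) and a per-index membership test, so no run boundaries or ranges are ever materialized.
import Mathlib
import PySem

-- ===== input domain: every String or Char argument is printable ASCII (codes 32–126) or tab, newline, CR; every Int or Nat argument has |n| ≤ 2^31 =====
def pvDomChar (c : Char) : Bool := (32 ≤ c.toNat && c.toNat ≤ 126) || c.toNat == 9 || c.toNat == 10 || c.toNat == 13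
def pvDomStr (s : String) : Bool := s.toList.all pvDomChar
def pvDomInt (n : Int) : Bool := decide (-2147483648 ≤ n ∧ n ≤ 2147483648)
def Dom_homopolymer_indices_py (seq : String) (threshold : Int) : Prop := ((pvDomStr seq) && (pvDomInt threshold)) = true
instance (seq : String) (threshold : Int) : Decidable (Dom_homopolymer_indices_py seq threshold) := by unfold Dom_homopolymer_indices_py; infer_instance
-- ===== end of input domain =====

-- B replaces A's run-enumerating two-pointer scan with two run-length DP arrays
-- (left/right run length per index) and a per-index membership test (objective:
-- alternative). Return value only; neither mutates its arguments.

-- ===== PORT A =====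
-- inner while 'j < n and seq[j] == b': (number of chars consumed, remaining suffix)
def pvInner (b : Char) : List Char → Nat × List Char
  | [] => (0, [])
  | x :: xs => if x == b then ((pvInner b xs).1 + 1, (pvInner b xs).2) else (0, x :: xs)

-- outer while over the suffix of seq starting at index i; fuel = remaining length
-- (the Python loop advances i by at least 1 per iteration, so fuel n suffices)
def pvLoopA (t : Int) : Nat → List Char → Int → List Int
  | 0, _, _ => []
  | _ + 1, [], _ => []
  | f + 1, b :: rest, i =>
    if b = 'A' ∨ b = 'T' ∨ b = 'C' ∨ b = 'G' then
      -- j := i + 1 + run-length; idxs.update(range(i, j)) when j - i >= threshold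
      let j : Int := i + 1 + (pvInner b rest).1
      (if j - i ≥ t then PySem.List.pyRange i j 1 else []) ++ pvLoopA t f (pvInner b rest).2 j
    else
      pvLoopA t f rest (i + 1)

def homopolymer_indices_py (seq : String) (threshold : Int) : List Int :=
  pvLoopA threshold seq.toList.length seq.toList 0

-- ===== PORT B =====
-- right[i] = right[i+1]+1 if seq[i]==seq[i+1] else 1, built right-to-left
-- (structural recursion over the list = the backward for-loop of Source B)
def pvRight : List Char → List Nat
  | [] => []
  | c :: rest =>
    (match rest with
     | d :: _ => if c = d then (pvRight rest).headD 0 + 1 else 1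
     | [] => 1) :: pvRight rest

-- left[i] = left[i-1]+1 if seq[i]==seq[i-1] else 1, built left-to-right carrying
-- the previous character and the previous left-value (the forward for-loop)
def pvLeft : Option Char → Nat → List Char → List Nat
  | _, _, [] => []
  | prev, k, c :: rest =>
    (if some c = prev then k + 1 else 1) :: pvLeft (some c) (if some c = prev then k + 1 else 1) rest

-- the set comprehension over enumerate(zip(seq, left, right))
def pvSelect (t : Int) : Int → List Char → List Nat → List Nat → List Int
  | _, [], _, _ => []
  | _, _, [], _ => []
  | _, _, _, [] => []
  | i, c :: cs, l :: ls, r :: rs =>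
    (if (c = 'A' ∨ c = 'T' ∨ c = 'C' ∨ c = 'G') ∧ ((l : Int) + (r : Int) - 1 ≥ t) then [i] else [])
      ++ pvSelect t (i + 1) cs ls rs

def homopolymer_indices_py_alt (seq : String) (threshold : Int) : List Int :=
  pvSelect threshold 0 seq.toList (pvLeft none 0 seq.toList) (pvRight seq.toList)

-- ===== PRECONDITION & SPEC =====
def Spec_homopolymer_indices_py (seq : String) (threshold : Int) (out : List Int) : Prop := out = homopolymer_indices_py_alt seq threshold
instance (seq : String) (threshold : Int) (out : List Int) : Decidable (Spec_homopolymer_indices_py seq threshold out) := by unfold Spec_homopolymer_indices_py; infer_instance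

-- ===== CLAIM (what is proved, stated in full; the proofs are below) =====
def Claim_equal_homopolymer_indices_py : Prop := ∀ (seq : String) (threshold : Int), Dom_homopolymer_indices_py seq threshold → Spec_homopolymer_indices_py seq threshold (homopolymer_indices_py seq threshold)

-- ===== LEMMAS AND PROOFS =====

-- [L, L-1, ..., 1] : the right-run-length values inside one run
def pvDesc : Nat → List Nat
  | 0 => []
  | k + 1 => (k + 1) :: pvDesc k

-- [m+1, m+2, ..., m+k] : the left-run-length values inside one run
def pvAsc : Nat → Nat → List Nat
  | _, 0 => []
  | m, k + 1 => (m + 1) :: pvAsc (m + 1) k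

theorem pvInner_eq (b : Char) (l : List Char) :
    pvInner b l = ((l.takeWhile (· == b)).length, l.dropWhile (· == b)) := by
  induction l with
  | nil => simp [pvInner]
  | cons x xs ih =>
    simp only [pvInner, List.takeWhile, List.dropWhile]
    by_cases h : (x == b) = true <;> simp [h, ih]

theorem pvTakeWhile_replicate (c : Char) (l : List Char) :
    l.takeWhile (· == c) = List.replicate (l.takeWhile (· == c)).length c := by
  induction l with
  | nil => simp
  | cons x xs ih =>
    by_cases h : x = c
    · subst h
      have hb : (x == x) = true := by simp
      simp only [List.takeWhile, hb, List.length_cons, List.replicate]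
      exact congrArg (x :: ·) ih
    · have hb : (x == c) = false := by simp [h]
      simp [List.takeWhile, hb]

theorem pvDropWhile_head (c : Char) (l : List Char) (d : Char)
    (h : (l.dropWhile (· == c)).head? = some d) : d ≠ c := by
  induction l with
  | nil => simp at h
  | cons x xs ih =>
    by_cases hx : x = c
    · subst hx
      apply ih
      simpa [List.dropWhile] using h
    · have hb : (x == c) = false := by simp [hx]
      simp [List.dropWhile, hb] at h
      exact fun hdc => hx (h.trans hdc)

theorem pvRight_run (c : Char) (R : List Char)
    (hR : ∀ d, R.head? = some d → d ≠ c) :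
    ∀ k, pvRight (List.replicate k c ++ R) = pvDesc k ++ pvRight R := by
  intro k
  induction k with
  | zero => simp [pvDesc]
  | succ k ih =>
    cases k with
    | zero =>
      cases R with
      | nil => simp [pvRight, pvDesc]
      | cons d R' =>
        have hd : d ≠ c := hR d rfl
        simp [pvRight, pvDesc, Ne.symm hd]
    | succ k' =>
      simp only [List.replicate, List.cons_append] at ih ⊢
      rw [pvRight, ih]
      simp [pvDesc]

theorem pvLeft_run (c : Char) (R : List Char) :
    ∀ (k m : Nat), pvLeft (some c) m (List.replicate k c ++ R) = pvAsc m k ++ pvLeft (some c) (m + k) R := by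
  intro k
  induction k with
  | zero => intro m; simp [pvAsc]
  | succ k ih =>
    intro m
    simp only [List.replicate, List.cons_append, pvLeft, pvAsc, if_true]
    rw [ih (m + 1)]
    have h : m + 1 + k = m + (k + 1) := by omega
    simp [h]

theorem pvLeft_boundary (c : Char) (R : List Char)
    (hR : ∀ d, R.head? = some d → d ≠ c) (m : Nat) :
    pvLeft (some c) m R = pvLeft none 0 R := by
  cases R with
  | nil => rfl
  | cons d R' =>
    have hd : d ≠ c := hR d rfl
    simp [pvLeft, hd]

theorem pvSelect_run (t : Int) (c : Char) :
    ∀ (k m : Nat) (i : Int) (cs : List Char) (ls rs : List Nat),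
      pvSelect t i (List.replicate k c ++ cs) (pvAsc m k ++ ls) (pvDesc k ++ rs)
        = (if (c = 'A' ∨ c = 'T' ∨ c = 'C' ∨ c = 'G') ∧ (((m + k : Nat) : Int) ≥ t)
            then PySem.List.pyRange i (i + (k : Int)) 1 else [])
          ++ pvSelect t (i + (k : Int)) cs ls rs := by
  intro k
  induction k with
  | zero =>
    intro m i cs ls rs
    simp [pvAsc, pvDesc]
  | succ k ih =>
    intro m i cs ls rs
    simp only [List.replicate, List.cons_append, pvAsc, pvDesc, pvSelect]
    rw [ih (m + 1)]
    have hcond : (((m + 1 : Nat) : Int) + ((k + 1 : Nat) : Int) - 1 ≥ t)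
        ↔ (((m + (k + 1) : Nat) : Int) ≥ t) := by push_cast; omega
    have hcond2 : ((((m + 1) + k : Nat) : Int) ≥ t) ↔ (((m + (k + 1) : Nat) : Int) ≥ t) := by
      constructor <;> (intro h; push_cast at h ⊢; omega)
    have harg : i + 1 + (k : Int) = i + ((k + 1 : Nat) : Int) := by push_cast; ring
    by_cases hc : (c = 'A' ∨ c = 'T' ∨ c = 'C' ∨ c = 'G') ∧ (((m + (k + 1) : Nat) : Int) ≥ t)
    · rw [if_pos ⟨hc.1, hcond.mpr hc.2⟩, if_pos ⟨hc.1, hcond2.mpr hc.2⟩, if_pos hc]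
      have hrange : PySem.List.pyRange i (i + ((k + 1 : Nat) : Int)) 1
          = i :: PySem.List.pyRange (i + 1) (i + ((k + 1 : Nat) : Int)) 1 :=
        PySem.List.pyRange_one_cons (by push_cast; omega)
      rw [hrange, harg]
      simp
    · rw [if_neg (fun h => hc ⟨h.1, hcond.mp h.2⟩), if_neg (fun h => hc ⟨h.1, hcond2.mp h.2⟩),
        if_neg hc]
      simp only [List.nil_append]
      rw [harg]

-- fuel insensitivity of A's outer loop once fuel covers the remaining length
theorem pvLoopA_fuel (t : Int) :
    ∀ f, ∀ (l : List Char) (i : Int), l.length ≤ f →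
      pvLoopA t f l i = pvLoopA t l.length l i := by
  intro f
  induction f using Nat.strong_induction_on with
  | _ f ih =>
    intro l i hl
    cases f with
    | zero =>
      have : l = [] := by cases l <;> simp_all
      subst this; rfl
    | succ f =>
      cases l with
      | nil => rfl
      | cons c rest =>
        simp only [List.length_cons] at hl
        simp only [pvLoopA, List.length_cons]
        by_cases hc : c = 'A' ∨ c = 'T' ∨ c = 'C' ∨ c = 'G'
        · rw [if_pos hc, if_pos hc]
          have hd : (pvInner c rest).2.length ≤ rest.length := by
            rw [pvInner_eq]; exact List.length_dropWhile_le _ _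
          have h1 : (pvInner c rest).2.length ≤ f := by omega
          rw [ih f (by omega) _ _ h1, ih rest.length (by omega) _ _ hd]
        · rw [if_neg hc, if_neg hc]
          have h1 : rest.length ≤ f := by omega
          rw [ih f (by omega) _ _ h1, ih rest.length (by omega) _ _ le_rfl]

-- A's loop walks a non-ACGT run one character per iteration
theorem pvLoopA_skip (t : Int) (c : Char)
    (hc : ¬ (c = 'A' ∨ c = 'T' ∨ c = 'C' ∨ c = 'G')) (R : List Char) :
    ∀ (k f : Nat) (i : Int), R.length + k ≤ f →
      pvLoopA t f (List.replicate k c ++ R) i = pvLoopA t (f - k) R (i + (k : Int)) := by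
  intro k
  induction k with
  | zero => intro f i _; simp
  | succ k ih =>
    intro f i hf
    cases f with
    | zero => omega
    | succ f =>
      simp only [List.replicate, List.cons_append, pvLoopA, if_neg hc]
      rw [ih f (i + 1) (by omega)]
      have h1 : f - k = f + 1 - (k + 1) := by omega
      have h2 : i + 1 + (k : Int) = i + ((k + 1 : Nat) : Int) := by push_cast; ring
      rw [h1, h2]

theorem pvMain (t : Int) : ∀ (f : Nat) (l : List Char), l.length ≤ f → ∀ i : Int,
    pvLoopA t f l i = pvSelect t i l (pvLeft none 0 l) (pvRight l) := by
  intro f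
  induction f with
  | zero =>
    intro l hl i
    have : l = [] := by cases l <;> simp_all
    subst this; simp [pvLoopA, pvSelect]
  | succ f ih =>
    intro l hl i
    cases l with
    | nil => simp [pvLoopA, pvSelect]
    | cons c rest =>
      simp only [List.length_cons] at hl
      set tw := (rest.takeWhile (· == c)).length with htw
      set R := rest.dropWhile (· == c) with hRdef
      have hrest : rest = List.replicate tw c ++ R := by
        conv_lhs => rw [← List.takeWhile_append_dropWhile (p := (· == c)) (l := rest)]
        rw [← hRdef, ← pvTakeWhile_replicate c rest]
      have hR : ∀ d, R.head? = some d → d ≠ c := fun d hd => pvDropWhile_head c rest d hd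
      have hlen : tw + R.length = rest.length := by
        have := congrArg List.length hrest
        simp at this; omega
      have hRf : R.length ≤ f := by omega
      have hldec : c :: rest = List.replicate (tw + 1) c ++ R := by
        rw [hrest]; rfl
      -- B side: decompose left/right arrays along the leading run and select per run
      have hBleft : pvLeft none 0 (c :: rest) = pvAsc 0 (tw + 1) ++ pvLeft none 0 R := by
        conv_lhs => rw [hrest]
        simp only [pvLeft, if_neg (by simp : ¬ (some c = none))]
        rw [pvLeft_run c R tw 1, pvLeft_boundary c R hR]
        simp [pvAsc]
      have hBright : pvRight (c :: rest) = pvDesc (tw + 1) ++ pvRight R := by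
        rw [hldec]; exact pvRight_run c R hR (tw + 1)
      have hB : pvSelect t i (c :: rest) (pvLeft none 0 (c :: rest)) (pvRight (c :: rest))
          = (if (c = 'A' ∨ c = 'T' ∨ c = 'C' ∨ c = 'G') ∧ (((tw + 1 : Nat) : Int) ≥ t)
              then PySem.List.pyRange i (i + ((tw + 1 : Nat) : Int)) 1 else [])
            ++ pvSelect t (i + ((tw + 1 : Nat) : Int)) R (pvLeft none 0 R) (pvRight R) := by
        rw [hBleft, hBright]
        conv_lhs => rw [hldec]
        have := pvSelect_run t c (tw + 1) 0 i R (pvLeft none 0 R) (pvRight R)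
        simpa using this
      rw [hB]
      by_cases hc : c = 'A' ∨ c = 'T' ∨ c = 'C' ∨ c = 'G'
      · simp only [pvLoopA, if_pos hc, pvInner_eq, ← htw, ← hRdef]
        rw [ih R hRf]
        have hiffs : (i + 1 + (tw : Int) - i ≥ t) ↔ (((tw + 1 : Nat) : Int) ≥ t) := by
          push_cast; omega
        have harg : i + 1 + (tw : Int) = i + ((tw + 1 : Nat) : Int) := by push_cast; ring
        rw [if_congr hiffs rfl rfl, harg]
        by_cases ht : ((tw + 1 : Nat) : Int) ≥ t
        · rw [if_pos ht, if_pos ⟨hc, ht⟩]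
        · rw [if_neg ht, if_neg (fun h => ht h.2)]
      · rw [if_neg (fun h => hc h.1)]
        simp only [pvLoopA, if_neg hc]
        conv_lhs => rw [hrest]
        rw [pvLoopA_skip t c hc R tw f (i + 1) (by omega)]
        rw [pvLoopA_fuel t (f - tw) R _ (by omega), ← pvLoopA_fuel t f R _ hRf]
        rw [ih R hRf]
        simp only [List.nil_append]
        have harg : i + 1 + (tw : Int) = i + ((tw + 1 : Nat) : Int) := by push_cast; ring
        rw [harg]

-- ===== VERDICT (by name: the statement is the Claim_ definition above) =====
theorem homopolymer_indices_py_spec : Claim_equal_homopolymer_indices_py := by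
  intro seq t _
  unfold Spec_homopolymer_indices_py homopolymer_indices_py homopolymer_indices_py_alt
  exact pvMain t seq.toList.length seq.toList le_rfl 0
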